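-- pv_equiv track=rewrite | github.com/bibektako/programming-for-developers | src/TrailExplorer.py | longest_trek
-- ===== SOURCE A (Python) =====
-- def longest_trek(elevations, max_diff):
--     max_distance = 0
--     index = 1
--     while index < len(elevations):
--         if elevations[index] > elevations[index - 1]:
--             trek_length = 1
--             while index + trek_length < len(elevations) and elevations[index + trek_length] - elevations[index + trek_length - 1] <= max_diff:
--                 trek_length += 1
--             max_distance = max(max_distance, trek_length)
--         index += 1
--     return max_distance
-- ===== SOURCE B (Python) =====
-- def longest_trek(elevations, max_diff):
--     # One right-to-left pass computes reach[i] = length of the step-bounded run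
--     # starting at i; the answer is the max reach over indices with an uptick.
--     reach = []
--     prev_r = 0
--     prev_e = None
--     for e in reversed(elevations):
--         r = prev_r + 1 if prev_e is not None and prev_e - e <= max_diff else 1
--         reach.append(r)
--         prev_r = r
--         prev_e = e
--     reach.reverse()
--     best = 0
--     for (p, c), r in zip(zip(elevations, elevations[1:]), reach[1:]):
--         if c > p:
--             best = max(best, r)
--     return best
-- ===== Notes on version B (the rewrite author's own statement) =====
-- stated objective: faster
-- what changed: Replaces A's inner rescan from every uptick index with a single right-to-left pass computing each index's forward reach, then one pass taking the max reach over uptick indices.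
import Mathlib
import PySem

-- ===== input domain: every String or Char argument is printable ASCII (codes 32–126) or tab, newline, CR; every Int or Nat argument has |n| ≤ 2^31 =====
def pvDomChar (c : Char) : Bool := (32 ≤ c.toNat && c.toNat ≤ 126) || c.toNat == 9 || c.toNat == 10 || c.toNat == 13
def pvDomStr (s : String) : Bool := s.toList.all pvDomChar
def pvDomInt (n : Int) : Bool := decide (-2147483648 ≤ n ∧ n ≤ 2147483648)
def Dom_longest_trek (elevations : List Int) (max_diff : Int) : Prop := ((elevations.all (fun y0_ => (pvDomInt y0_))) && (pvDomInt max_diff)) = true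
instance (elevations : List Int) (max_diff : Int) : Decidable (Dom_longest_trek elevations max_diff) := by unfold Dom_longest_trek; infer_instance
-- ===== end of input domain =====

-- B replaces A's quadratic rescan with one right-to-left reach pass plus one max pass (objective: faster).

-- ===== PORT A =====
-- inner while loop of A: extends trek_length while the next step is within max_diff
def innerLoopA (e : List Int) (m : Int) (index t : Nat) : Nat :=
  if h : index + t < e.length ∧ e[index + t]! - e[index + t - 1]! ≤ m then
    innerLoopA e m index (t + 1)
  else t
termination_by e.length - (index + t)
decreasing_by omega

-- outer while loop of A over index, carrying max_distance
def outerLoopA (e : List Int) (m : Int) (index md : Nat) : Nat :=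
  if index < e.length then
    outerLoopA e m (index + 1)
      (if e[index]! > e[index - 1]! then max md (innerLoopA e m index 1) else md)
  else md
termination_by e.length - index

def longest_trek (elevations : List Int) (max_diff : Int) : Int :=
  (outerLoopA elevations max_diff 1 0 : Int)

-- ===== PORT B =====
-- one step of Source B's loop over reversed(elevations); Source B appends then reverses the
-- list at the end, consing while scanning the reversed list builds the same list
def stepB (m : Int) (acc : List Nat × Nat × Option Int) (x : Int) : List Nat × Nat × Option Int :=
  let r : Nat :=
    match acc.2.2 with
    | some pe => if pe - x ≤ m then acc.2.1 + 1 else 1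
    | none => 1
  (r :: acc.1, r, some x)

def longest_trek_alt (elevations : List Int) (max_diff : Int) : Int :=
  let reach := (elevations.reverse.foldl (stepB max_diff) ([], 0, none)).1
  let best : Nat := ((elevations.zip (elevations.drop 1)).zip (reach.drop 1)).foldl
    (fun best pr => if pr.1.2 > pr.1.1 then max best pr.2 else best) 0
  (best : Int)

-- ===== PRECONDITION & SPEC =====
def Spec_longest_trek (elevations : List Int) (max_diff : Int) (out : Int) : Prop := out = longest_trek_alt elevations max_diff
instance (elevations : List Int) (max_diff : Int) (out : Int) : Decidable (Spec_longest_trek elevations max_diff out) := by unfold Spec_longest_trek; infer_instance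

-- ===== CLAIM (what is proved, stated in full; the proofs are below) =====
def Claim_equal_longest_trek : Prop := ∀ (elevations : List Int) (max_diff : Int), Dom_longest_trek elevations max_diff → Spec_longest_trek elevations max_diff (longest_trek elevations max_diff)

-- ===== LEMMAS AND PROOFS =====

-- length of the maximal step-bounded run starting at the head
def chainL (m : Int) : List Int → Nat
  | [] => 0
  | [_] => 1
  | a :: b :: r => if b - a ≤ m then chainL m (b :: r) + 1 else 1

def reachOf (m : Int) : List Int → List Nat
  | [] => []
  | a :: rest => chainL m (a :: rest) :: reachOf m rest

lemma foldB_eq (m : Int) (e : List Int) :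
    e.reverse.foldl (stepB m) ([], 0, none) = (reachOf m e, chainL m e, e.head?) := by
  rw [List.foldl_reverse]
  induction e with
  | nil => rfl
  | cons a rest ih =>
    cases rest with
    | nil => rfl
    | cons b r' =>
      simp only [List.foldr_cons] at ih ⊢
      rw [ih]
      simp [stepB, reachOf, chainL]

lemma drop_cons_getElem! (e : List Int) (j : Nat) (h : j < e.length) :
    e.drop j = e[j]! :: e.drop (j + 1) := by
  rw [getElem!_pos e j h]
  exact (List.getElem_cons_drop ..).symm

lemma reachOf_drop (m : Int) (e : List Int) (j : Nat) :
    (reachOf m e).drop j = reachOf m (e.drop j) := by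
  induction j generalizing e with
  | zero => simp
  | succ k ih =>
    cases e with
    | nil => simp [reachOf]
    | cons a rest => simpa [reachOf] using ih rest

lemma chain_step (e : List Int) (m : Int) (j : Nat) (h : j < e.length) :
    chainL m (e.drop j) =
      if j + 1 < e.length ∧ e[j + 1]! - e[j]! ≤ m then chainL m (e.drop (j + 1)) + 1 else 1 := by
  rw [drop_cons_getElem! e j h]
  by_cases h1 : j + 1 < e.length
  · rw [drop_cons_getElem! e (j + 1) h1]
    simp only [chainL]
    by_cases h2 : e[j + 1]! - e[j]! ≤ m <;>
      simp [h1]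
  · have : e.drop (j + 1) = [] := List.drop_eq_nil_of_le (by omega)
    rw [this]
    simp [chainL, h1]

lemma inner_eq (e : List Int) (m : Int) (i : Nat) :
    ∀ d t, 1 ≤ t → i + t - 1 < e.length → e.length - (i + t) ≤ d →
      innerLoopA e m i t = t - 1 + chainL m (e.drop (i + t - 1)) := by
  intro d
  induction d with
  | zero =>
    intro t ht h hd
    rw [innerLoopA, chain_step e m (i + t - 1) h]
    have hge : e.length ≤ i + t := by omega
    have : ¬ (i + t < e.length ∧ e[i + t]! - e[i + t - 1]! ≤ m) := by omega
    have h2 : ¬ (i + t - 1 + 1 < e.length ∧ e[i + t - 1 + 1]! - e[i + t - 1]! ≤ m) := by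
      intro hc; omega
    rw [dif_neg this, if_neg h2]
    omega
  | succ k ih =>
    intro t ht h hd
    rw [innerLoopA, chain_step e m (i + t - 1) h]
    have hidx : i + t - 1 + 1 = i + t := by omega
    by_cases hc : i + t < e.length ∧ e[i + t]! - e[i + t - 1]! ≤ m
    · rw [dif_pos hc, if_pos (by rw [hidx]; exact hc)]
      rw [ih (t + 1) (by omega) (by omega) (by omega)]
      have : i + (t + 1) - 1 = i + t - 1 + 1 := by omega
      rw [this]
      omega
    · rw [dif_neg hc, if_neg (by rw [hidx]; exact hc)]
      omega

lemma outer_eq (e : List Int) (m : Int) :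
    ∀ d idx md, 1 ≤ idx → e.length - idx ≤ d →
      outerLoopA e m idx md =
        (((e.drop (idx - 1)).zip (e.drop idx)).zip (reachOf m (e.drop idx))).foldl
          (fun best pr => if pr.1.2 > pr.1.1 then max best pr.2 else best) md := by
  intro d
  induction d with
  | zero =>
    intro idx md h1 hd
    have hge : e.length ≤ idx := by omega
    rw [outerLoopA, if_neg (by omega)]
    rw [List.drop_eq_nil_of_le hge]
    simp [reachOf]
  | succ k ih =>
    intro idx md h1 hd
    by_cases hlt : idx < e.length
    · have hc2 : e.drop idx = e[idx]! :: e.drop (idx + 1) := drop_cons_getElem! e idx hlt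
      have hc1 : e.drop (idx - 1) = e[idx - 1]! :: e[idx]! :: e.drop (idx + 1) := by
        rw [drop_cons_getElem! e (idx - 1) (by omega), show idx - 1 + 1 = idx by omega, hc2]
      have hr : reachOf m (e[idx]! :: e.drop (idx + 1)) =
          chainL m (e.drop idx) :: reachOf m (e.drop (idx + 1)) := by
        simp only [reachOf]
        rw [← hc2]
      have hinner : innerLoopA e m idx 1 = chainL m (e.drop idx) := by
        have := inner_eq e m idx (e.length - (idx + 1)) 1 (by omega) (by simpa using hlt)
          (by omega)
        simpa using this
      rw [outerLoopA, if_pos hlt, ih (idx + 1) _ (by omega) (by omega), hinner]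
      simp only [Nat.add_sub_cancel]
      rw [hc1, hc2, hr]
      simp only [List.zip_cons_cons, List.foldl_cons]
      rw [hc2]
    · rw [outerLoopA, if_neg hlt]
      rw [List.drop_eq_nil_of_le (show e.length ≤ idx by omega)]
      simp [reachOf]

-- ===== VERDICT (by name: the statement is the Claim_ definition above) =====
theorem longest_trek_spec : Claim_equal_longest_trek := by
  intro e m _
  have h := outer_eq e m e.length 1 0 (by omega) (by omega)
  simp only [show (1 : Nat) - 1 = 0 from rfl, List.drop_zero] at h
  simp only [Spec_longest_trek, longest_trek, longest_trek_alt, foldB_eq, reachOf_drop]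
  exact_mod_cast h
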